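-- pv_equiv track=rewrite | github.com/goagain/Yahtzee-AI | simple search/Controller.py | Yahtzee
-- ===== SOURCE A (Python) =====
-- def Yahtzee(dices):  # For AAAAA
--     m = {}
--     for x in dices:
--         if x in m:
--             m[x] += 1
--         else:
--             m[x] = 1
--     if len(m) == 1:
--         return 50  # TODO: hard code
--     return 0
-- ===== SOURCE B (Python) =====
-- def Yahtzee(dices):
--     if not dices:
--         return 0
--     first = dices[0]
--     for d in dices[1:]:
--         if d != first:
--             return 0
--     return 50
-- ===== Notes on version B (the rewrite author's own statement) =====
-- stated objective: simpler
-- what changed: B drops the count map entirely: it compares every remaining die to the first and short-circuits on the first mismatch, instead of building a full histogram and checking its key count.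
import Mathlib
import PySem

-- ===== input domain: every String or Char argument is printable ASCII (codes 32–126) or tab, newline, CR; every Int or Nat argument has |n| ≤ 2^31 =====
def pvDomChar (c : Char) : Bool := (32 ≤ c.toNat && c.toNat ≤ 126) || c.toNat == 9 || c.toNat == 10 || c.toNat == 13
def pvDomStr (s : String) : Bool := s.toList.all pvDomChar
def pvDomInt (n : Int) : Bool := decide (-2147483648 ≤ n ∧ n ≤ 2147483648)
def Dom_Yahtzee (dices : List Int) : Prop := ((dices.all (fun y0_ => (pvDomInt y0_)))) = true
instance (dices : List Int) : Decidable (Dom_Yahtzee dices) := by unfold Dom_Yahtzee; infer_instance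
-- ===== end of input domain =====

-- B drops the count map: it compares every remaining die to the first and short-circuits
-- on the first mismatch, instead of building a full histogram and checking its key count (objective: simpler).


-- ===== PORT A =====
-- m = {}; for x in dices: m[x] += 1 / m[x] = 1; return 50 if len(m) == 1 else 0
def Yahtzee (dices : List Int) : Int :=
  let m := dices.foldl
    (fun (m : PySem.Dict Int Int) x =>
      if m.contains x then m.modify x 0 (· + 1) else m.insert x 1)
    PySem.Dict.empty
  if m.size = 1 then 50 else 0

-- ===== PORT B =====
-- the 'for d in dices[1:]' loop of Source B: 0 on the first mismatch, 50 if it completes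
def yahtzeeCheck (first : Int) : List Int → Int
  | [] => 50
  | d :: rest => if d ≠ first then 0 else yahtzeeCheck first rest

def Yahtzee_alt : List Int → Int
  | [] => 0
  | first :: rest => yahtzeeCheck first rest

-- ===== PRECONDITION & SPEC =====
def Spec_Yahtzee (dices : List Int) (out : Int) : Prop := out = Yahtzee_alt dices
instance (dices : List Int) (out : Int) : Decidable (Spec_Yahtzee dices out) := by unfold Spec_Yahtzee; infer_instance

-- ===== CLAIM (what is proved, stated in full; the proofs are below) =====
def Claim_equal_Yahtzee : Prop := ∀ (dices : List Int), Dom_Yahtzee dices → Spec_Yahtzee dices (Yahtzee dices)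

-- ===== LEMMAS AND PROOFS =====

-- A's conditional update step is exactly the Counter step
theorem yahtzee_step_eq (d : PySem.Dict Int Int) (x : Int) :
    (if d.contains x then d.modify x 0 (· + 1) else d.insert x 1) = d.modify x 0 (· + 1) := by
  by_cases h : d.contains x = true
  · simp [h]
  · simp only [Bool.not_eq_true] at h
    simp [h, PySem.Dict.modify, PySem.Dict.getD_of_not_contains]

-- A in closed form: 50 iff the dice have exactly one distinct value
theorem yahtzee_closed (xs : List Int) :
    Yahtzee xs = if (PySem.Set.ofList xs).length = 1 then 50 else 0 := by
  unfold Yahtzee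
  have hf : (fun (m : PySem.Dict Int Int) x =>
        if m.contains x then m.modify x 0 (· + 1) else m.insert x 1)
      = (fun (m : PySem.Dict Int Int) x => m.modify x 0 (· + 1)) := by
    funext m x; exact yahtzee_step_eq m x
  rw [hf, ← PySem.Dict.counter_eq_foldl]
  simp [PySem.Dict.size, PySem.Dict.items_counter]

theorem nodup_all_eq_single {a : Int} {s : List Int}
    (hnd : s.Nodup) (hmem : a ∈ s) (hall : ∀ x ∈ s, x = a) : s = [a] := by
  cases s with
  | nil => cases hmem
  | cons b r =>
    have hb : b = a := hall b (List.mem_cons_self)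
    subst hb
    cases r with
    | nil => rfl
    | cons c r' =>
      have hc : c = b := hall c (by simp)
      subst hc
      simp at hnd

theorem check_all_eq {a : Int} {t : List Int} (h : ∀ x ∈ t, x = a) :
    yahtzeeCheck a t = 50 := by
  induction t with
  | nil => rfl
  | cons d r ih =>
    have hd : d = a := h d (List.mem_cons_self)
    simp [yahtzeeCheck, hd]
    exact ih (fun x hx => h x (List.mem_cons_of_mem _ hx))

theorem check_mismatch {a : Int} {t : List Int} (h : ¬ ∀ x ∈ t, x = a) :
    yahtzeeCheck a t = 0 := by
  induction t with
  | nil => exact absurd (by simp) h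
  | cons d r ih =>
    by_cases hd : d = a
    · have hr : ¬ ∀ x ∈ r, x = a := by
        intro hr
        exact h (fun x hx => by
          rcases List.mem_cons.mp hx with rfl | hx'
          · exact hd
          · exact hr x hx')
      simp [yahtzeeCheck, hd, ih hr]
    · simp [yahtzeeCheck, hd]

-- ===== VERDICT (by name: the statement is the Claim_ definition above) =====
theorem Yahtzee_spec : Claim_equal_Yahtzee := by
  intro dices _
  unfold Spec_Yahtzee
  rw [yahtzee_closed]
  cases dices with
  | nil => rfl
  | cons a t =>
    by_cases hall : ∀ x ∈ t, x = a
    · have hs : PySem.Set.ofList (a :: t) = [a] := by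
        apply nodup_all_eq_single (PySem.Set.nodup_ofList _)
        · exact (PySem.Set.mem_ofList _ _).mpr (List.mem_cons_self)
        · intro x hx
          rcases List.mem_cons.mp ((PySem.Set.mem_ofList _ _).mp hx) with rfl | hx'
          · rfl
          · exact hall x hx'
      simp [hs, Yahtzee_alt, check_all_eq hall]
    · have hne : (PySem.Set.ofList (a :: t)).length ≠ 1 := by
        intro hlen
        rcases List.length_eq_one_iff.mp hlen with ⟨y, hy⟩
        simp only [not_forall, exists_prop] at hall
        rcases hall with ⟨x, hx, hxa⟩
        have hxs : x ∈ PySem.Set.ofList (a :: t) :=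
          (PySem.Set.mem_ofList _ _).mpr (List.mem_cons_of_mem _ hx)
        have has : a ∈ PySem.Set.ofList (a :: t) :=
          (PySem.Set.mem_ofList _ _).mpr (List.mem_cons_self)
        rw [hy] at hxs has
        simp at hxs has
        exact hxa (hxs.trans has.symm)
      simp [hne, Yahtzee_alt, check_mismatch hall]
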